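-- pv_equiv track=rewrite | github.com/yonasman/DSA-Practice | PrefixSum.py | maxSubArrayWithinTarget
-- ===== SOURCE A (Python) =====
-- def maxSubArrayWithinTarget(nums, target):
--     n = len(nums)
--     maxSum = float("-inf")
--
--     for i in range(n):
--         currentSum = 0
--         for j in range(i,n):
--             currentSum += nums[j]
--             if currentSum <= target:
--                 maxSum = max(maxSum, currentSum)
--     return maxSum if maxSum != float("-inf") else 0
-- ===== SOURCE B (Python) =====
-- def maxSubArrayWithinTarget(nums, target):
--     # Prefix sums + sorted list with binary search:
--     # best subarray ending at k has sum P[k] - min{P[i] : P[i] >= P[k] - target}.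
--     best = None
--     prefixes = [0]  # sorted list of prefix sums seen so far
--     cur = 0
--     for x in nums:
--         cur += x
--         i = _bisect_left(prefixes, cur - target)
--         if i < len(prefixes):
--             cand = cur - prefixes[i]
--             if best is None or cand > best:
--                 best = cand
--         prefixes.insert(_bisect_left(prefixes, cur), cur)
--     return best if best is not None else 0
--
--
-- def _bisect_left(a, x):
--     lo, hi = 0, len(a)
--     while lo < hi:
--         mid = (lo + hi) // 2
--         if a[mid] < x:
--             lo = mid + 1
--         else:
--             hi = mid
--     return lo
-- ===== Notes on version B (the rewrite author's own statement) =====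
-- stated objective: faster
-- what changed: Replaces A's double loop over all O(n^2) subarrays by one pass over prefix sums kept in a sorted list: for each position a hand-written bisect_left finds the smallest earlier prefix >= cur - target, giving the best subarray ending there.
import Mathlib
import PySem

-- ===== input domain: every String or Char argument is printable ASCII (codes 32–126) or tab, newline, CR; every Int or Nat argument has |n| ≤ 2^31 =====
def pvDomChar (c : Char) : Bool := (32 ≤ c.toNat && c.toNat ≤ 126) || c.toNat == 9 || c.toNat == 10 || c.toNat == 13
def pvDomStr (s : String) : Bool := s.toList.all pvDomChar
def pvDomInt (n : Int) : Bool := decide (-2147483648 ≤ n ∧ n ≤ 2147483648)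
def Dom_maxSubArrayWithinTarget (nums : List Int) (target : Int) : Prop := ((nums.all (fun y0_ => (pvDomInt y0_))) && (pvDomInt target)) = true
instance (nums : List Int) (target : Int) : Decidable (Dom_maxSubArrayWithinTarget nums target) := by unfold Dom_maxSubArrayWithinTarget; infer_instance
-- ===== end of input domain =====

-- B replaces A's O(n^2) double loop by prefix sums kept in a sorted list with hand-written
-- binary search (bisect_left): best subarray ending at k is P[k] minus the smallest earlier
-- prefix ≥ P[k] - target.  Objective: faster.

-- ===== PORT A =====
-- running max with -inf modelled as `none` (Python: maxSum = float("-inf"); max(maxSum, cur))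
def maxO (o : Option Int) (x : Int) : Option Int :=
  some (match o with | none => x | some m => max m x)

def maxSubArrayWithinTarget (nums : List Int) (target : Int) : Int :=
  let n : Int := nums.length
  let res : Option Int :=
    (PySem.List.pyRange 0 n 1).foldl (fun maxSum i =>
      ((PySem.List.pyRange i n 1).foldl
        (fun (st : Int × Option Int) j =>
          let cur := st.1 + PySem.List.pyGetD nums j 0
          if cur ≤ target then (cur, maxO st.2 cur) else (cur, st.2))
        ((0 : Int), maxSum)).2) none
  match res with
  | some m => m
  | none => 0

-- ===== PORT B =====
-- Source B's hand-written bisect_left (while lo < hi: mid = (lo+hi)//2; ...)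
def bisectLeftGo (a : List Int) (x : Int) (lo hi : Nat) : Nat :=
  -- mid = (lo + hi) // 2, inlined
  if lo < hi then
    if a.getD ((lo + hi) / 2) 0 < x then bisectLeftGo a x ((lo + hi) / 2 + 1) hi
    else bisectLeftGo a x lo ((lo + hi) / 2)
  else lo
termination_by hi - lo
decreasing_by all_goals omega

def bisectLeft (a : List Int) (x : Int) : Nat := bisectLeftGo a x 0 a.length

-- loop body of Source B: state = (best, sorted prefix list, running sum)
def bStep (target : Int) (st : Option Int × List Int × Int) (x : Int) :
    Option Int × List Int × Int :=
  let cur := st.2.2 + x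
  let s := st.2.1
  let i := bisectLeft s (cur - target)
  let best :=
    if i < s.length then
      let cand := cur - s.getD i 0
      match st.1 with
      | none => some cand
      | some b => if cand > b then some cand else some b
    else st.1
  (best, s.insertIdx (bisectLeft s cur) cur, cur)

def maxSubArrayWithinTarget_alt (nums : List Int) (target : Int) : Int :=
  match (nums.foldl (bStep target) (none, [0], 0)).1 with
  | some b => b
  | none => 0

-- ===== PRECONDITION & SPEC =====
def Spec_maxSubArrayWithinTarget (nums : List Int) (target : Int) (out : Int) : Prop := out = maxSubArrayWithinTarget_alt nums target
instance (nums : List Int) (target : Int) (out : Int) : Decidable (Spec_maxSubArrayWithinTarget nums target out) := by unfold Spec_maxSubArrayWithinTarget; infer_instance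

-- ===== CLAIM (what is proved, stated in full; the proofs are below) =====
def Claim_equal_maxSubArrayWithinTarget : Prop := ∀ (nums : List Int) (target : Int), Dom_maxSubArrayWithinTarget nums target → Spec_maxSubArrayWithinTarget nums target (maxSubArrayWithinTarget nums target)

-- ===== LEMMAS AND PROOFS =====

-- fold of the running max
def foldMax (o : Option Int) (l : List Int) : Option Int := l.foldl maxO o

-- candidates contributed by one column (all subarrays ending at prefix p, earlier prefixes ps)
def colC (target p : Int) (ps : List Int) : List Int :=
  ps.filterMap (fun q => if p - q ≤ target then some (p - q) else none)

def cols (target : Int) : List Int → Int → List Int → List (List Int)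
  | _, _, [] => []
  | ps, cur, x :: rest => colC target (cur + x) ps :: cols target (ps ++ [cur + x]) (cur + x) rest

-- candidates contributed by one row of A (subarrays starting at a fixed index)
def rowC (target c : Int) : List Int → List Int
  | [] => []
  | x :: r => (if c + x ≤ target then [c + x] else []) ++ rowC target (c + x) r

def rowsFlat (target : Int) : List Int → List Int
  | [] => []
  | x :: r => rowC target 0 (x :: r) ++ rowsFlat target r

-- ---- generic foldMax facts ----
lemma foldMax_cons (o : Option Int) (a : Int) (l : List Int) :
    foldMax o (a :: l) = foldMax (maxO o a) l := rfl

lemma foldMax_append (o : Option Int) (l1 l2 : List Int) :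
    foldMax o (l1 ++ l2) = foldMax (foldMax o l1) l2 := by
  simp [foldMax, List.foldl_append]

lemma maxO_some (o : Option Int) (a : Int) :
    ∃ v, maxO o a = some v ∧ a ≤ v ∧ (∀ b, o = some b → b ≤ v) ∧ (v = a ∨ o = some v) := by
  cases o with
  | none => exact ⟨a, rfl, le_refl _, by simp, Or.inl rfl⟩
  | some b =>
    refine ⟨max b a, rfl, le_max_right _ _, by intro c hc; injection hc with hc; subst hc; exact le_max_left _ _, ?_⟩
    rcases max_choice b a with h | h
    · exact Or.inr (by rw [h])
    · exact Or.inl h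

lemma foldMax_spec (l : List Int) (o : Option Int) :
    (foldMax o l = none → o = none ∧ l = []) ∧
    (∀ m, foldMax o l = some m → (m ∈ l ∨ o = some m) ∧ (∀ y ∈ l, y ≤ m) ∧ (∀ b, o = some b → b ≤ m)) := by
  induction l generalizing o with
  | nil =>
    refine ⟨fun h => ⟨h, rfl⟩, fun m h => ?_⟩
    have : o = some m := h
    exact ⟨Or.inr this, by simp, fun b hb => by rw [hb] at this; injection this with h2; omega⟩
  | cons a l ih =>
    obtain ⟨v, hv, hav, hob, hcase⟩ := maxO_some o a
    rw [foldMax_cons]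
    constructor
    · intro h
      have := (ih (maxO o a)).1 h
      rw [hv] at this
      exact absurd this.1 (by simp)
    · intro m h
      obtain ⟨hmem, hall, hub⟩ := (ih (maxO o a)).2 m h
      have hvm : v ≤ m := hub v hv
      refine ⟨?_, ?_, ?_⟩
      · rcases hmem with h1 | h1
        · exact Or.inl (List.mem_cons_of_mem _ h1)
        · rw [hv] at h1; injection h1 with h1; subst h1
          rcases hcase with h2 | h2
          · exact Or.inl (h2 ▸ List.mem_cons_self)
          · exact Or.inr h2
      · intro y hy
        rcases List.mem_cons.mp hy with rfl | hy
        · omega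
        · exact hall y hy
      · intro b hb
        have := hob b hb; omega

lemma foldMax_eq (o : Option Int) (l : List Int) :
    foldMax o l = match foldMax none l with | none => o | some m => maxO o m := by
  induction l generalizing o with
  | nil => rfl
  | cons a l ih =>
    rw [foldMax_cons, foldMax_cons]
    have h1 := ih (maxO o a)
    have h2 := ih (maxO none a)
    cases hM : foldMax none l with
    | none =>
      rw [hM] at h1 h2
      simp only [] at h1 h2
      rw [h1, h2]
      rfl
    | some m =>
      rw [hM] at h1 h2
      simp only [] at h1 h2
      rw [h1, h2]
      show maxO (maxO o a) m = maxO o (max a m)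
      cases o with
      | none => simp [maxO]
      | some b => simp [maxO, max_assoc]

lemma foldMax_none_congr_mem (l1 l2 : List Int)
    (h : ∀ x, x ∈ l1 ↔ x ∈ l2) : foldMax none l1 = foldMax none l2 := by
  cases h1 : foldMax none l1 with
  | none =>
    cases h2 : foldMax none l2 with
    | none => rfl
    | some m =>
      have hm := ((foldMax_spec l2 none).2 m h2).1
      have hmem : m ∈ l2 := by rcases hm with h' | h'; exact h'; simp at h'
      have := ((foldMax_spec l1 none).1 h1).2
      rw [this] at h
      exact absurd ((h m).mpr hmem) (by simp)
  | some m1 =>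
    cases h2 : foldMax none l2 with
    | none =>
      have hm := ((foldMax_spec l1 none).2 m1 h1).1
      have hmem : m1 ∈ l1 := by rcases hm with h' | h'; exact h'; simp at h'
      have := ((foldMax_spec l2 none).1 h2).2
      rw [this] at h
      exact absurd ((h m1).mp hmem) (by simp)
    | some m2 =>
      obtain ⟨ha1, hb1, -⟩ := (foldMax_spec l1 none).2 m1 h1
      obtain ⟨ha2, hb2, -⟩ := (foldMax_spec l2 none).2 m2 h2
      have hmem1 : m1 ∈ l1 := by rcases ha1 with h' | h'; exact h'; simp at h'
      have hmem2 : m2 ∈ l2 := by rcases ha2 with h' | h'; exact h'; simp at h'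
      have e1 : m1 ≤ m2 := hb2 m1 ((h m1).mp hmem1)
      have e2 : m2 ≤ m1 := hb1 m2 ((h m2).mpr hmem2)
      rw [le_antisymm e1 e2]

lemma foldMax_congr_mem (o : Option Int) (l1 l2 : List Int)
    (h : ∀ x, x ∈ l1 ↔ x ∈ l2) : foldMax o l1 = foldMax o l2 := by
  rw [foldMax_eq o l1, foldMax_eq o l2, foldMax_none_congr_mem l1 l2 h]

lemma foldMax_of_le (m : Int) (l : List Int) (h : ∀ y ∈ l, y ≤ m) :
    foldMax (some m) l = some m := by
  induction l with
  | nil => rfl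
  | cons a l ih =>
    rw [foldMax_cons]
    have : maxO (some m) a = some m := by
      simp only [maxO]
      rw [max_eq_left (h a List.mem_cons_self)]
    rw [this]
    exact ih (fun y hy => h y (List.mem_cons_of_mem _ hy))

lemma foldMax_head_max (o : Option Int) (a : Int) (l : List Int)
    (h : ∀ y ∈ l, y ≤ a) : foldMax o (a :: l) = maxO o a := by
  rw [foldMax_cons]
  obtain ⟨v, hv, hav, -, -⟩ := maxO_some o a
  rw [hv]
  exact foldMax_of_le v l (fun y hy => le_trans (h y hy) hav)

-- ---- bisect correctness ----
lemma sorted_getD_mono {s : List Int} (hs : s.Pairwise (· ≤ ·)) {i j : Nat}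
    (hij : i ≤ j) (hj : j < s.length) : s.getD i 0 ≤ s.getD j 0 := by
  have hi : i < s.length := lt_of_le_of_lt hij hj
  rw [List.getD_eq_getElem s 0 hi, List.getD_eq_getElem s 0 hj]
  rcases lt_or_eq_of_le hij with h | h
  · exact List.pairwise_iff_getElem.mp hs i j hi hj h
  · subst h; exact le_refl _

lemma bisectLeftGo_spec (a : List Int) (x : Int) :
    ∀ fuel lo hi, hi - lo ≤ fuel → lo ≤ hi → hi ≤ a.length →
    (∀ m, m < lo → a.getD m 0 < x) → (∀ m, hi ≤ m → m < a.length → x ≤ a.getD m 0) →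
    a.Pairwise (· ≤ ·) →
    lo ≤ bisectLeftGo a x lo hi ∧ bisectLeftGo a x lo hi ≤ hi ∧
    (∀ m, m < bisectLeftGo a x lo hi → a.getD m 0 < x) ∧
    (∀ m, bisectLeftGo a x lo hi ≤ m → m < a.length → x ≤ a.getD m 0) := by
  intro fuel
  induction fuel with
  | zero =>
    intro lo hi hf hlh hhl hlo hhi hs
    have : ¬ lo < hi := by omega
    rw [bisectLeftGo, if_neg this]
    exact ⟨le_refl _, hlh, hlo, fun m hm hml => hhi m (by omega) hml⟩
  | succ f ih =>
    intro lo hi hf hlh hhl hlo hhi hs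
    rw [bisectLeftGo]
    by_cases hlt : lo < hi
    · rw [if_pos hlt]
      by_cases hm : a.getD ((lo + hi) / 2) 0 < x
      · rw [if_pos hm]
        have hmidlen : (lo + hi) / 2 < a.length := by omega
        obtain ⟨r1, r2, r3, r4⟩ := ih ((lo + hi) / 2 + 1) hi (by omega) (by omega) hhl
          (fun m hmm => lt_of_le_of_lt (sorted_getD_mono hs (by omega) hmidlen) hm) hhi hs
        exact ⟨by omega, r2, r3, r4⟩
      · rw [if_neg hm]
        obtain ⟨r1, r2, r3, r4⟩ := ih lo ((lo + hi) / 2) (by omega) (by omega) (by omega) hlo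
          (fun m hmm hml => le_trans (le_of_not_gt hm) (sorted_getD_mono hs hmm hml)) hs
        exact ⟨r1, by omega, r3, r4⟩
    · rw [if_neg hlt]
      exact ⟨le_refl _, hlh, hlo, fun m hm hml => hhi m (by omega) hml⟩

lemma bisectLeft_spec (a : List Int) (x : Int) (hs : a.Pairwise (· ≤ ·)) :
    bisectLeft a x ≤ a.length ∧
    (∀ m, m < bisectLeft a x → a.getD m 0 < x) ∧
    (∀ m, bisectLeft a x ≤ m → m < a.length → x ≤ a.getD m 0) := by
  obtain ⟨r1, r2, r3, r4⟩ := bisectLeftGo_spec a x a.length 0 a.length (by omega) (by omega)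
    (le_refl _) (by omega) (by omega) hs
  exact ⟨r2, r3, r4⟩

-- ---- B side ----
lemma colC_mem (target p : Int) (ps : List Int) (y : Int) :
    y ∈ colC target p ps ↔ ∃ q ∈ ps, p - q ≤ target ∧ y = p - q := by
  simp only [colC, List.mem_filterMap, Option.ite_none_right_eq_some, Option.some.injEq]
  constructor
  · rintro ⟨q, hq, hle, he⟩; exact ⟨q, hq, hle, he.symm⟩
  · rintro ⟨q, hq, hle, he⟩; exact ⟨q, hq, hle, he.symm⟩

lemma ins_take_drop (a : Int) : ∀ (n : Nat) (l : List Int), n ≤ l.length →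
    l.insertIdx n a = l.take n ++ a :: l.drop n := by
  intro n
  induction n with
  | zero => intro l _; simp
  | succ n ih =>
    intro l hl
    cases l with
    | nil => simp at hl
    | cons x xs =>
      simp only [List.insertIdx_succ_cons, List.take_succ_cons, List.drop_succ_cons, List.cons_append]
      rw [ih xs (by simpa using hl)]

lemma mem_take_lt {s : List Int} {i : Nat} {q : Int} (h : q ∈ s.take i) :
    ∃ m, m < i ∧ m < s.length ∧ s.getD m 0 = q := by
  obtain ⟨m, hm, he⟩ := List.mem_iff_getElem.mp h
  have hlen : m < i ∧ m < s.length := by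
    have := hm; simp at this; omega
  refine ⟨m, hlen.1, hlen.2, ?_⟩
  rw [List.getD_eq_getElem s 0 hlen.2, ← List.getElem_take (h := hm)]
  exact he

lemma mem_drop_ge {s : List Int} {i : Nat} {q : Int} (h : q ∈ s.drop i) :
    ∃ m, i ≤ m ∧ m < s.length ∧ s.getD m 0 = q := by
  obtain ⟨m, hm, he⟩ := List.mem_iff_getElem.mp h
  have hlen : i + m < s.length := by
    have := hm; simp at this; omega
  refine ⟨i + m, by omega, hlen, ?_⟩
  rw [List.getD_eq_getElem s 0 hlen, ← List.getElem_drop (h := hm)]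
  exact he

lemma filterMap_all_some (g : Int → Int) (f : Int → Option Int) :
    ∀ (l : List Int), (∀ a ∈ l, f a = some (g a)) → l.filterMap f = l.map g := by
  intro l
  induction l with
  | nil => intro _; rfl
  | cons a r ih =>
    intro h
    rw [List.filterMap_cons, h a List.mem_cons_self, List.map_cons,
      ih (fun b hb => h b (List.mem_cons_of_mem _ hb))]

lemma colC_eq_map_drop (target p : Int) (s : List Int) (hs : s.Pairwise (· ≤ ·)) :
    colC target p s = (s.drop (bisectLeft s (p - target))).map (fun q => p - q) := by
  obtain ⟨h1, h2, h3⟩ := bisectLeft_spec s (p - target) hs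
  conv_lhs => rw [colC, ← List.take_append_drop (bisectLeft s (p - target)) s]
  rw [List.filterMap_append]
  have htake : (s.take (bisectLeft s (p - target))).filterMap
      (fun q => if p - q ≤ target then some (p - q) else none) = [] := by
    rw [List.filterMap_eq_nil_iff]
    intro q hq
    obtain ⟨m, hm1, hm2, he⟩ := mem_take_lt hq
    have := h2 m hm1
    rw [he] at this
    rw [if_neg (by omega)]
  have hdrop : (s.drop (bisectLeft s (p - target))).filterMap
      (fun q => if p - q ≤ target then some (p - q) else none)
      = (s.drop (bisectLeft s (p - target))).map (fun q => p - q) := by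
    apply filterMap_all_some
    intro q hq
    obtain ⟨m, hm1, hm2, he⟩ := mem_drop_ge hq
    have := h3 m hm1 hm2
    rw [he] at this
    rw [if_pos (by omega)]
  rw [htake, hdrop, List.nil_append]

lemma bStep_best (target : Int) (best : Option Int) (s : List Int) (cur0 x : Int)
    (hs : s.Pairwise (· ≤ ·)) :
    (bStep target (best, s, cur0) x).1 = foldMax best (colC target (cur0 + x) s) := by
  obtain ⟨h1, h2, h3⟩ := bisectLeft_spec s ((cur0 + x) - target) hs
  have hcol := colC_eq_map_drop target (cur0 + x) s hs
  show (if bisectLeft s ((cur0 + x) - target) < s.length then _ else best) = _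
  by_cases hil : bisectLeft s ((cur0 + x) - target) < s.length
  · rw [if_pos hil, hcol, List.drop_eq_getElem_cons hil, List.map_cons]
    rw [foldMax_head_max]
    · rw [← List.getD_eq_getElem s 0 hil]
      cases best with
      | none => rfl
      | some b =>
        simp only [maxO]
        by_cases hgt : cur0 + x - s.getD (bisectLeft s (cur0 + x - target)) 0 > b
        · rw [if_pos hgt, max_eq_right (le_of_lt hgt)]
        · rw [if_neg hgt, max_eq_left (by omega)]
    · intro y hy
      obtain ⟨q, hq, he⟩ := List.mem_map.mp hy
      obtain ⟨m, hm1, hm2, he2⟩ := mem_drop_ge hq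
      have hmono : s.getD (bisectLeft s ((cur0 + x) - target)) 0 ≤ s.getD m 0 :=
        sorted_getD_mono hs (by omega) hm2
      rw [List.getD_eq_getElem s 0 hil] at hmono
      omega
  · rw [if_neg hil, hcol, List.drop_of_length_le (by omega), List.map_nil]
    rfl

lemma bStep_sorted (target : Int) (best : Option Int) (s : List Int) (cur0 x : Int)
    (hs : s.Pairwise (· ≤ ·)) :
    (bStep target (best, s, cur0) x).2.1.Pairwise (· ≤ ·) ∧
    (∀ q, q ∈ (bStep target (best, s, cur0) x).2.1 ↔ q = cur0 + x ∨ q ∈ s) := by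
  obtain ⟨h1, h2, h3⟩ := bisectLeft_spec s (cur0 + x) hs
  show (s.insertIdx (bisectLeft s (cur0 + x)) (cur0 + x)).Pairwise (· ≤ ·) ∧ _
  constructor
  · rw [ins_take_drop _ _ _ h1, List.pairwise_append]
    refine ⟨List.Pairwise.sublist (List.take_sublist _ _) hs, ?_, ?_⟩
    · rw [List.pairwise_cons]
      refine ⟨?_, List.Pairwise.sublist (List.drop_sublist _ _) hs⟩
      intro q hq
      obtain ⟨m, hm1, hm2, he⟩ := mem_drop_ge hq
      have := h3 m hm1 hm2; omega
    · intro q hq y hy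
      obtain ⟨m, hm1, hm2, he⟩ := mem_take_lt hq
      have hql : q < cur0 + x := by have := h2 m hm1; omega
      rcases List.mem_cons.mp hy with rfl | hy2
      · omega
      · obtain ⟨m2, hn1, hn2, he2⟩ := mem_drop_ge hy2
        have := h3 m2 hn1 hn2; omega
  · intro q
    show q ∈ s.insertIdx (bisectLeft s (cur0 + x)) (cur0 + x) ↔ _
    rw [List.mem_insertIdx h1]

lemma bFold_eq (target : Int) (rest : List Int) :
    ∀ (best : Option Int) (s ps : List Int) (cur : Int),
    s.Pairwise (· ≤ ·) → (∀ q, q ∈ s ↔ q ∈ ps) →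
    (rest.foldl (bStep target) (best, s, cur)).1
      = foldMax best (cols target ps cur rest).flatten := by
  induction rest with
  | nil => intro best s ps cur _ _; rfl
  | cons a r ih =>
    intro best s ps cur hs hmem
    rw [List.foldl_cons]
    obtain ⟨hsort', hmem'⟩ := bStep_sorted target best s cur a hs
    have hmem2 : ∀ q, q ∈ (bStep target (best, s, cur) a).2.1 ↔ q ∈ ps ++ [cur + a] := by
      intro q
      rw [hmem' q, List.mem_append, List.mem_singleton]
      constructor
      · rintro (h | h)
        · exact Or.inr h
        · exact Or.inl ((hmem q).mp h)
      · rintro (h | h)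
        · exact Or.inr ((hmem q).mpr h)
        · exact Or.inl h
    have key : (r.foldl (bStep target) (bStep target (best, s, cur) a)).1
        = foldMax (bStep target (best, s, cur) a).1 (cols target (ps ++ [cur + a]) (cur + a) r).flatten :=
      ih (bStep target (best, s, cur) a).1 (bStep target (best, s, cur) a).2.1
        (ps ++ [cur + a]) (bStep target (best, s, cur) a).2.2 hsort' hmem2
    rw [key, bStep_best target best s cur a hs,
      foldMax_congr_mem best (colC target (cur + a) s) (colC target (cur + a) ps) ?hcc,
      ← foldMax_append]
    · rfl
    · intro y
      rw [colC_mem, colC_mem]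
      constructor
      · rintro ⟨q, hq, hle, he⟩; exact ⟨q, (hmem q).mp hq, hle, he⟩
      · rintro ⟨q, hq, hle, he⟩; exact ⟨q, (hmem q).mpr hq, hle, he⟩

-- ---- A side ----
lemma rowFold_eq (target : Int) : ∀ (l : List Int) (c : Int) (o : Option Int),
    (l.foldl (fun (st : Int × Option Int) v =>
        if st.1 + v ≤ target then (st.1 + v, maxO st.2 (st.1 + v)) else (st.1 + v, st.2)) (c, o)).2
      = foldMax o (rowC target c l) := by
  intro l
  induction l with
  | nil => intro c o; rfl
  | cons x r ih =>
    intro c o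
    rw [List.foldl_cons]
    by_cases h : c + x ≤ target
    · rw [if_pos h, ih,
        show rowC target c (x :: r) = (if c + x ≤ target then [c + x] else []) ++ rowC target (c + x) r from rfl,
        if_pos h, List.singleton_append, foldMax_cons]
    · rw [if_neg h, ih,
        show rowC target c (x :: r) = (if c + x ≤ target then [c + x] else []) ++ rowC target (c + x) r from rfl,
        if_neg h, List.nil_append]

lemma innerFold_eq (nums : List Int) (target : Int) :
    ∀ (i : Nat) (c : Int) (o : Option Int), i ≤ nums.length →
    ((PySem.List.pyRange (i : Int) (nums.length : Int) 1).foldl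
        (fun (st : Int × Option Int) j =>
          let cur := st.1 + PySem.List.pyGetD nums j 0
          if cur ≤ target then (cur, maxO st.2 cur) else (cur, st.2))
        (c, o)).2
      = foldMax o (rowC target c (nums.drop i)) := by
  intro i c o hi
  have h := PySem.List.foldl_pyRange_pyGetD' nums 0
    (fun (st : Int × Option Int) v =>
      if st.1 + v ≤ target then (st.1 + v, maxO st.2 (st.1 + v)) else (st.1 + v, st.2))
    (c, o) (show (0 : Int) ≤ (i : Int) from Int.natCast_nonneg i)
  have h2 := congrArg Prod.snd h
  rw [Int.toNat_natCast] at h2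
  exact h2.trans (rowFold_eq target (nums.drop i) c o)

lemma outerFold_eq (target : Int) : ∀ (l : List Int) (o : Option Int),
    (List.range l.length).foldl (fun o k => foldMax o (rowC target 0 (l.drop k))) o
      = foldMax o (rowsFlat target l) := by
  intro l
  induction l with
  | nil => intro o; rfl
  | cons x r ih =>
    intro o
    rw [List.length_cons, List.range_succ_eq_map, List.foldl_cons, List.foldl_map]
    simp only [List.drop_succ_cons, List.drop_zero]
    rw [ih (foldMax o (rowC target 0 (x :: r))),
      show rowsFlat target (x :: r) = rowC target 0 (x :: r) ++ rowsFlat target r from rfl,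
      foldMax_append]

lemma A_eq_rowsFlat (nums : List Int) (target : Int) :
    maxSubArrayWithinTarget nums target
      = match foldMax none (rowsFlat target nums) with
        | some m => m
        | none => 0 := by
  show (match (PySem.List.pyRange 0 (nums.length : Int) 1).foldl (fun maxSum i =>
      ((PySem.List.pyRange i (nums.length : Int) 1).foldl
        (fun (st : Int × Option Int) j =>
          let cur := st.1 + PySem.List.pyGetD nums j 0
          if cur ≤ target then (cur, maxO st.2 cur) else (cur, st.2))
        ((0 : Int), maxSum)).2) none with
    | some m => m
    | none => 0) = _
  rw [PySem.List.pyRange_one 0 (nums.length : Int), List.foldl_map,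
    PySem.List.foldl_congr_mem (List.range (((nums.length : Int) - 0)).toNat) _
      (fun (o : Option Int) (k : Nat) => foldMax o (rowC target 0 (nums.drop k))) none ?h]
  · rw [show (((nums.length : Int) - 0)).toNat = nums.length by simp, outerFold_eq target nums none]
  case h =>
    intro acc k hk
    have hk2 : k ≤ nums.length := by
      have := List.mem_range.mp hk; simp at this; omega
    have := innerFold_eq nums target k 0 acc hk2
    simpa using this


-- ---- membership characterizations ----
lemma rowC_mem (target : Int) : ∀ (l : List Int) (c x : Int),
    x ∈ rowC target c l ↔ ∃ k, k < l.length ∧ x = c + (l.take (k + 1)).sum ∧ x ≤ target := by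
  intro l
  induction l with
  | nil => intro c x; simp [rowC]
  | cons a r ih =>
    intro c x
    rw [show rowC target c (a :: r) = (if c + a ≤ target then [c + a] else []) ++ rowC target (c + a) r from rfl,
      List.mem_append, ih (c + a)]
    constructor
    · rintro (h | ⟨k, hk, he, hle⟩)
      · by_cases hc : c + a ≤ target
        · rw [if_pos hc, List.mem_singleton] at h
          refine ⟨0, by simp, ?_, by omega⟩
          simpa using h
        · rw [if_neg hc] at h; simp at h
      · refine ⟨k + 1, by simpa using Nat.succ_lt_succ hk, ?_, hle⟩
        rw [List.take_succ_cons, List.sum_cons]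
        omega
    · rintro ⟨k, hk, he, hle⟩
      cases k with
      | zero =>
        left
        have hx : x = c + a := by simpa using he
        rw [if_pos (by omega), List.mem_singleton]
        exact hx
      | succ k =>
        right
        refine ⟨k, by have := hk; simp at this; omega, ?_, hle⟩
        rw [List.take_succ_cons, List.sum_cons] at he
        omega

lemma rowsFlat_mem (target : Int) : ∀ (l : List Int) (x : Int),
    x ∈ rowsFlat target l ↔
      ∃ i k, i + k < l.length ∧ x = ((l.drop i).take (k + 1)).sum ∧ x ≤ target := by
  intro l
  induction l with
  | nil => intro x; simp [rowsFlat]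
  | cons a r ih =>
    intro x
    rw [show rowsFlat target (a :: r) = rowC target 0 (a :: r) ++ rowsFlat target r from rfl,
      List.mem_append, rowC_mem target (a :: r) 0 x, ih]
    constructor
    · rintro (⟨k, hk, he, hle⟩ | ⟨i, k, hik, he, hle⟩)
      · exact ⟨0, k, by simpa using hk, by simpa using he, hle⟩
      · exact ⟨i + 1, k, by simp; omega, by simpa [List.drop_succ_cons] using he, hle⟩
    · rintro ⟨i, k, hik, he, hle⟩
      cases i with
      | zero => exact Or.inl ⟨k, by simpa using hik, by simpa using he, hle⟩
      | succ i =>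
        exact Or.inr ⟨i, k, by have := hik; simp at this; omega, by simpa [List.drop_succ_cons] using he, hle⟩

lemma cols_mem (target : Int) : ∀ (rest ps : List Int) (cur x : Int),
    x ∈ (cols target ps cur rest).flatten ↔
      ∃ m, m < rest.length ∧ ∃ q,
        (q ∈ ps ∨ ∃ t, t < m ∧ q = cur + (rest.take (t + 1)).sum) ∧
        x = cur + (rest.take (m + 1)).sum - q ∧ x ≤ target := by
  intro rest
  induction rest with
  | nil => intro ps cur x; simp [cols]
  | cons a r ih =>
    intro ps cur x
    rw [show cols target ps cur (a :: r)
        = colC target (cur + a) ps :: cols target (ps ++ [cur + a]) (cur + a) r from rfl,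
      List.flatten_cons, List.mem_append, colC_mem, ih (ps ++ [cur + a]) (cur + a)]
    constructor
    · rintro (⟨q, hq, hle, he⟩ | ⟨m, hm, q, hq, he, hle⟩)
      · refine ⟨0, by simp, q, Or.inl hq, ?_, by omega⟩
        simp only [List.take_succ_cons, List.take_zero, List.sum_cons, List.sum_nil]
        omega
      · refine ⟨m + 1, by simp; omega, q, ?_, ?_, hle⟩
        · rcases hq with hq | ⟨t, ht, hqe⟩
          · rcases List.mem_append.mp hq with h | h
            · exact Or.inl h
            · refine Or.inr ⟨0, by omega, ?_⟩
              simp only [List.take_succ_cons, List.take_zero, List.sum_cons, List.sum_nil]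
              simp at h
              omega
          · refine Or.inr ⟨t + 1, by omega, ?_⟩
            rw [List.take_succ_cons, List.sum_cons]
            omega
        · rw [List.take_succ_cons, List.sum_cons]
          omega
    · rintro ⟨m, hm, q, hq, he, hle⟩
      cases m with
      | zero =>
        left
        rcases hq with hq | ⟨t, ht, _⟩
        · simp only [List.take_succ_cons, List.take_zero, List.sum_cons, List.sum_nil] at he
          exact ⟨q, hq, by omega, by omega⟩
        · omega
      | succ m =>
        right
        refine ⟨m, by have := hm; simp at this; omega, q, ?_, ?_, hle⟩
        · rcases hq with hq | ⟨t, ht, hqe⟩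
          · exact Or.inl (List.mem_append.mpr (Or.inl hq))
          · cases t with
            | zero =>
              refine Or.inl (List.mem_append.mpr (Or.inr ?_))
              simp only [List.take_succ_cons, List.take_zero, List.sum_cons, List.sum_nil] at hqe
              simp
              omega
            | succ t =>
              refine Or.inr ⟨t, by omega, ?_⟩
              rw [List.take_succ_cons, List.sum_cons] at hqe
              omega
        · rw [List.take_succ_cons, List.sum_cons] at he
          omega

lemma seg_sum (l : List Int) (i k : Nat) :
    ((l.drop i).take k).sum = (l.take (i + k)).sum - (l.take i).sum := by
  rw [List.take_add, List.sum_append]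
  ring

lemma mem_rows_iff_cols (nums : List Int) (target x : Int) :
    x ∈ rowsFlat target nums ↔ x ∈ (cols target [0] 0 nums).flatten := by
  rw [rowsFlat_mem, cols_mem]
  constructor
  · rintro ⟨i, k, hik, he, hle⟩
    refine ⟨i + k, by omega, (nums.take i).sum, ?_, ?_, hle⟩
    · cases i with
      | zero => exact Or.inl (by simp)
      | succ i => exact Or.inr ⟨i, by omega, by simp⟩
    · rw [seg_sum] at he
      have h1 : i + (k + 1) = i + k + 1 := by omega
      rw [h1] at he
      omega
  · rintro ⟨m, hm, q, hq, he, hle⟩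
    rcases hq with hq | ⟨t, ht, hqe⟩
    · have hq0 : q = 0 := by simpa using hq
      refine ⟨0, m, by omega, ?_, hle⟩
      rw [seg_sum]
      simp only [List.take_zero, List.sum_nil, Nat.zero_add]
      omega
    · refine ⟨t + 1, m - t - 1, by omega, ?_, hle⟩
      rw [seg_sum]
      have h1 : t + 1 + (m - t - 1 + 1) = m + 1 := by omega
      rw [h1]
      omega

-- ===== VERDICT (by name: the statement is the Claim_ definition above) =====
theorem maxSubArrayWithinTarget_spec : Claim_equal_maxSubArrayWithinTarget := by
  intro nums target _
  unfold Spec_maxSubArrayWithinTarget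
  have hA := A_eq_rowsFlat nums target
  have hB : maxSubArrayWithinTarget_alt nums target
      = match foldMax none (cols target [0] 0 nums).flatten with
        | some b => b
        | none => 0 := by
    unfold maxSubArrayWithinTarget_alt
    rw [bFold_eq target nums none [0] [0] 0 (by simp) (fun q => Iff.rfl)]
  rw [hA, hB, foldMax_congr_mem none _ _ (fun y => mem_rows_iff_cols nums target y)]
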